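-- pv_equiv track=rewrite | github.com/NasirzadehMoh/CoLog | colog/groundtruth/extraction/groundtruth_base.py | _set_anomaly_label
-- ===== SOURCE A (Python) =====
-- from typing import List, Dict, Tuple, Any
--
-- def _set_anomaly_label(wordlist: List[str], message: str) -> int:
--     """
--     Check whether any token from wordlist is present in message.
--
--     Parameters
--     ----------
--     wordlist : list[str]
--         List of lowercase anomaly keywords to search for.
--     message : str
--         The log message to check.
--
--     Returns
--     -------
--     int
--         0 if any wordlist token appears in message (anomaly),
--         1 otherwise (normal).
--     """
--     message = message.lower().strip()
--     anomaly_label = 1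
--
--     for word in wordlist:
--         if word in message:
--             anomaly_label = 0
--             return anomaly_label
--
--     return anomaly_label
-- ===== SOURCE B (Python) =====
-- def _set_anomaly_label(wordlist, message):
--     """Index the keywords by first character, then scan the message once,
--     probing only the keywords that could start at each position."""
--     m = message.lower().strip()
--     buckets = {}
--     for w in wordlist:
--         buckets.setdefault(w[:1], []).append(w)
--     if "" in buckets:
--         return 0
--     for i, c in enumerate(m):
--         for w in buckets.get(c, ()):
--             if m.startswith(w, i):
--                 return 0
--     return 1
-- ===== Notes on version B (the rewrite author's own statement) =====
-- stated objective: alternative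
-- what changed: B replaces A's per-word 'word in message' loop by a single scan over the message with the keywords pre-indexed by first character, probing startswith only for the keywords that could begin at each position; proved equal via 'keyword is a substring iff it is a prefix of some suffix'.
import Mathlib
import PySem

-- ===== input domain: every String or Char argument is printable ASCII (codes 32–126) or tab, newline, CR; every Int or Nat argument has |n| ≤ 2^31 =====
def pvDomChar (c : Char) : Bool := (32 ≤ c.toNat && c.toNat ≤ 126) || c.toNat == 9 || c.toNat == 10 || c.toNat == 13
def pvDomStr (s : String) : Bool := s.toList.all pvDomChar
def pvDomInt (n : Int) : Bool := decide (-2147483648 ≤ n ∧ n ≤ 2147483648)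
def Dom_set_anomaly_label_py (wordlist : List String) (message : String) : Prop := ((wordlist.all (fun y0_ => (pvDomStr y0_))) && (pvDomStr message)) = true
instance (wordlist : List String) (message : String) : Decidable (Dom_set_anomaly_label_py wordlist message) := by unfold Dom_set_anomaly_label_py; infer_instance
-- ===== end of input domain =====

-- B replaces the per-word substring loop by one scan of the message with the keywords indexed by first character (alternative algorithm, same result proved equal).


-- ===== PORT A =====
-- for word in wordlist: if word in message: return 0 / return 1
def pvALoop (m : String) : List String → Int
  | [] => 1
  | w :: ws => if PySem.Str.isIn w m then 0 else pvALoop m ws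

def set_anomaly_label_py (wordlist : List String) (message : String) : Int :=
  pvALoop (PySem.Str.strip (PySem.Str.lower message)) wordlist

-- ===== PORT B =====
-- w[:1], the bucket key
def pvKey (w : String) : String := PySem.Str.slice w none (some 1)

-- for w in wordlist: buckets.setdefault(w[:1], []).append(w)
def pvBuckets (ws : List String) : PySem.Dict String (List String) :=
  ws.foldl (fun d w => d.insert (pvKey w) (d.getD (pvKey w) [] ++ [w])) PySem.Dict.empty

-- the inner 'for w in buckets.get(c, ()): if m.startswith(w, i): return 0';
-- m.startswith(w, i) is the prefix test on the current suffix m[i:] (= suf here)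
def pvBHit (suf : List Char) : List String → Bool
  | [] => false
  | w :: tl => PySem.Chars.startswith suf w.toList || pvBHit suf tl

-- 'for i, c in enumerate(m)': the loop walks the remaining characters; the list in hand IS the suffix m[i:]
def pvBLoop (d : PySem.Dict String (List String)) : List Char → Int
  | [] => 1
  | c :: rest =>
      if pvBHit (c :: rest) (d.getD (String.ofList [c]) []) then 0 else pvBLoop d rest

def set_anomaly_label_py_alt (wordlist : List String) (message : String) : Int :=
  let m := PySem.Str.strip (PySem.Str.lower message)
  let buckets := pvBuckets wordlist
  if buckets.contains "" then 0 else pvBLoop buckets m.toList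

-- ===== PRECONDITION & SPEC =====
def Spec_set_anomaly_label_py (wordlist : List String) (message : String) (out : Int) : Prop := out = set_anomaly_label_py_alt wordlist message
instance (wordlist : List String) (message : String) (out : Int) : Decidable (Spec_set_anomaly_label_py wordlist message out) := by unfold Spec_set_anomaly_label_py; infer_instance

-- ===== CLAIM (what is proved, stated in full; the proofs are below) =====
def Claim_equal_set_anomaly_label_py : Prop := ∀ (wordlist : List String) (message : String), Dom_set_anomaly_label_py wordlist message → Spec_set_anomaly_label_py wordlist message (set_anomaly_label_py wordlist message)

-- ===== LEMMAS AND PROOFS =====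

-- A's loop returns 0 exactly when some word is a substring of m
theorem pvALoop_eq (m : String) (ws : List String) :
    pvALoop m ws = if ws.any (fun w => PySem.Chars.isIn w.toList m.toList) then 0 else 1 := by
  induction ws with
  | nil => simp [pvALoop]
  | cons w tl ih =>
      simp only [pvALoop, List.any_cons, PySem.Str.isIn_eq] at *
      by_cases h : PySem.Chars.isIn w.toList m.toList = true <;> simp [h, ih]

theorem pvKey_toList (w : String) : (pvKey w).toList = w.toList.take 1 := by
  rw [pvKey, PySem.Str.toList_slice]
  show PySem.List.slice w.toList none (some 1) = List.take 1 w.toList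
  rw [PySem.List.slice_to w.toList (b := 1) (by norm_num)]
  norm_num

theorem pvKey_eq_empty_iff (w : String) : pvKey w = "" ↔ w = "" := by
  rw [← String.toList_inj, ← String.toList_inj, pvKey_toList]
  cases w.toList <;> simp

theorem pvKey_of_cons (w : String) (c : Char) (t : List Char) (h : w.toList = c :: t) :
    pvKey w = String.ofList [c] := by
  rw [← String.toList_inj, pvKey_toList, h]
  simp

-- bucket contents: the foldl groups exactly the words whose key is k, in order
theorem pvBuckets_getD_from (ws : List String) (d : PySem.Dict String (List String)) (k : String) :
    (ws.foldl (fun d w => d.insert (pvKey w) (d.getD (pvKey w) [] ++ [w])) d).getD k []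
      = d.getD k [] ++ ws.filter (fun w => pvKey w == k) := by
  induction ws generalizing d with
  | nil => simp
  | cons w tl ih =>
      simp only [List.foldl_cons, List.filter_cons, ih, PySem.Dict.getD_insert]
      by_cases h : k = pvKey w
      · simp [h, List.append_assoc]
      · have h' : (pvKey w == k) = false := by
          simp only [beq_eq_false_iff_ne]
          exact fun e => h e.symm
        simp [if_neg h, h']

theorem pvBuckets_getD (ws : List String) (k : String) :
    (pvBuckets ws).getD k [] = ws.filter (fun w => pvKey w == k) := by
  rw [pvBuckets, pvBuckets_getD_from]
  simp

-- '"" in buckets' detects exactly an empty keyword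
theorem pvBuckets_contains_from (ws : List String) (d : PySem.Dict String (List String)) (k : String) :
    (ws.foldl (fun d w => d.insert (pvKey w) (d.getD (pvKey w) [] ++ [w])) d).contains k
      = (d.contains k || ws.any (fun w => pvKey w == k)) := by
  induction ws generalizing d with
  | nil => simp
  | cons w tl ih =>
      simp only [List.foldl_cons, List.any_cons, ih, PySem.Dict.contains_insert]
      cases h : (k == pvKey w)
      · have h' : (pvKey w == k) = false := by
          rw [beq_eq_false_iff_ne] at h ⊢
          exact fun e => h e.symm
        simp [h']
      · have h' : (pvKey w == k) = true := by
          rw [beq_iff_eq] at h ⊢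
          exact h.symm
        simp [h']

theorem pvBuckets_contains_empty (ws : List String) :
    (pvBuckets ws).contains "" = ws.any (fun w => w == "") := by
  rw [pvBuckets, pvBuckets_contains_from]
  simp only [PySem.Dict.contains_empty, Bool.false_or]
  refine List.any_congr rfl ?_
  intro w
  simp [pvKey_eq_empty_iff]

theorem pvBHit_eq (s : List Char) (ws : List String) :
    pvBHit s ws = ws.any (fun w => PySem.Chars.startswith s w.toList) := by
  induction ws with
  | nil => rfl
  | cons w tl ih => simp [pvBHit, ih]

-- with no empty keyword, B's scan returns 0 exactly when some keyword is a substring of s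
theorem pvBLoop_eq (ws : List String) (hne : ∀ w ∈ ws, w ≠ "") (s : List Char) :
    pvBLoop (pvBuckets ws) s = if ws.any (fun w => PySem.Chars.isIn w.toList s) then 0 else 1 := by
  induction s with
  | nil =>
      rw [pvBLoop, if_neg]
      intro h
      rw [List.any_eq_true] at h
      obtain ⟨w, hw, hin⟩ := h
      rw [PySem.Chars.isIn_iff_infix, List.infix_nil] at hin
      exact hne w hw (by rw [← String.toList_inj, hin]; rfl)
  | cons c rest ih =>
      rw [pvBLoop]
      by_cases hhit : pvBHit (c :: rest) ((pvBuckets ws).getD (String.ofList [c]) []) = true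
      · rw [if_pos hhit, if_pos]
        rw [pvBHit_eq, List.any_eq_true] at hhit
        obtain ⟨w, hw, hs⟩ := hhit
        rw [pvBuckets_getD, List.mem_filter] at hw
        rw [List.any_eq_true]
        refine ⟨w, hw.1, ?_⟩
        rw [PySem.Chars.startswith_iff] at hs
        rw [PySem.Chars.isIn_iff_infix]
        exact hs.isInfix
      · rw [if_neg hhit, ih]
        -- no keyword starts at this position, so matching in c :: rest = matching in rest
        have hnopre : ∀ w ∈ ws, ¬ w.toList <+: (c :: rest) := by
          intro w hw hp
          rcases ht : w.toList with _ | ⟨c', t⟩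
          · exact hne w hw (by rw [← String.toList_inj, ht]; rfl)
          · have hc : c' = c := by
              rw [ht] at hp
              exact (List.cons_prefix_cons.mp hp).1
            apply hhit
            rw [pvBHit_eq, List.any_eq_true]
            refine ⟨w, ?_, ?_⟩
            · rw [pvBuckets_getD, List.mem_filter]
              refine ⟨hw, ?_⟩
              rw [beq_iff_eq]
              exact hc ▸ pvKey_of_cons w c' t ht
            · rw [PySem.Chars.startswith_iff]
              exact hp
        by_cases ht : List.any ws (fun w => PySem.Chars.isIn w.toList rest) = true
        · rw [if_pos ht, if_pos]
          rw [List.any_eq_true] at ht ⊢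
          obtain ⟨w, hw, hs⟩ := ht
          refine ⟨w, hw, ?_⟩
          rw [PySem.Chars.isIn_iff_infix] at hs ⊢
          exact hs.trans (List.suffix_cons c rest).isInfix
        · rw [if_neg ht, if_neg]
          intro hct
          rw [List.any_eq_true] at hct
          obtain ⟨w, hw, hs⟩ := hct
          rw [PySem.Chars.isIn_iff_infix, List.infix_cons_iff] at hs
          rcases hs with hp | hi
          · exact hnopre w hw hp
          · rw [List.any_eq_true] at ht
            exact ht ⟨w, hw, by rw [PySem.Chars.isIn_iff_infix]; exact hi⟩

-- ===== VERDICT (by name: the statement is the Claim_ definition above) =====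
theorem set_anomaly_label_py_spec : Claim_equal_set_anomaly_label_py := by
  intro wordlist message _
  unfold Spec_set_anomaly_label_py set_anomaly_label_py set_anomaly_label_py_alt
  simp only
  rw [pvALoop_eq]
  by_cases hemp : (pvBuckets wordlist).contains "" = true
  · rw [if_pos hemp, if_pos]
    rw [pvBuckets_contains_empty, List.any_eq_true] at hemp
    obtain ⟨w, hw, he⟩ := hemp
    rw [beq_iff_eq] at he
    rw [List.any_eq_true]
    exact ⟨w, hw, by rw [he]; exact PySem.Chars.isIn_nil _⟩
  · rw [if_neg hemp]
    have hne : ∀ w ∈ wordlist, w ≠ "" := by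
      intro w hw he
      apply hemp
      rw [pvBuckets_contains_empty, List.any_eq_true]
      exact ⟨w, hw, by rw [beq_iff_eq]; exact he⟩
    rw [pvBLoop_eq wordlist hne]
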